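-- pv_equiv track=rewrite | github.com/renta0426/NVIDIA-Nemotron-Model-Reasoning-Challenge | versions/v20_corrective_corpus_v11_stable_frontier/reproduce_v20_corrective_corpus_v11_stable_frontier.py | apply_affine
-- ===== SOURCE A (Python) =====
-- def apply_affine(coeffs: list[list[int]], bits: str) -> str:
--     inputs = [int(bit) for bit in bits] + [1]
--     output: list[str] = []
--     for row in coeffs:
--         value = 0
--         for coeff, item in zip(row, inputs):
--             value ^= coeff & item
--         output.append(str(value))
--     return "".join(output)
-- ===== SOURCE B (Python) =====
-- def _masks(vals):
--     # Pack the low four bits of each value into four per-bit-plane position masks.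
--     m0 = m1 = m2 = m3 = 0
--     for j, v in enumerate(vals):
--         if v & 1:
--             m0 |= 1 << j
--         if v & 2:
--             m1 |= 1 << j
--         if v & 4:
--             m2 |= 1 << j
--         if v & 8:
--             m3 |= 1 << j
--     return m0, m1, m2, m3
--
--
-- def apply_affine(coeffs: list[list[int]], bits: str) -> str:
--     # Bit-plane reformulation: the XOR-over-positions accumulation becomes,
--     # per bit plane, popcount-parity of (row mask AND input mask).  Values
--     # coeff & digit fit in 4 bits since each digit is at most 9.
--     digits = [int(c) for c in bits] + [1]
--     im0, im1, im2, im3 = _masks(digits)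
--     out = []
--     for row in coeffs:
--         r0, r1, r2, r3 = _masks(row)
--         value = ((r0 & im0).bit_count() & 1) \
--             | (((r1 & im1).bit_count() & 1) << 1) \
--             | (((r2 & im2).bit_count() & 1) << 2) \
--             | (((r3 & im3).bit_count() & 1) << 3)
--         out.append(str(value))
--     return "".join(out)
-- ===== Notes on version B (the rewrite author's own statement) =====
-- stated objective: alternative
-- what changed: Replaces the per-position XOR accumulation over zip(row, inputs) with a bit-plane mask formulation: the digits and each row's low four coefficient bits are packed into four per-plane position masks, and every output value is reassembled from the popcount parities of the ANDed masks (AND of masks also performs zip's truncation).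
import Mathlib
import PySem

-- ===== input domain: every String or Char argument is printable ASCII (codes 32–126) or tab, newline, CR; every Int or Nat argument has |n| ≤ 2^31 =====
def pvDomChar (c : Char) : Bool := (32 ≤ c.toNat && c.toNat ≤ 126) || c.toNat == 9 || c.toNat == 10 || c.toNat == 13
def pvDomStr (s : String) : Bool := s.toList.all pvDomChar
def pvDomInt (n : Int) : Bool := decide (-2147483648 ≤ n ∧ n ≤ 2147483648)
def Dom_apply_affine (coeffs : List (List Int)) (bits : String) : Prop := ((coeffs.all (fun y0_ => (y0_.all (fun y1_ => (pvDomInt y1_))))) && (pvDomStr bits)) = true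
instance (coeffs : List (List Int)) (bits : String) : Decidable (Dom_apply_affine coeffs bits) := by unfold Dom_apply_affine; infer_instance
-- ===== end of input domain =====

-- B is an alternative exact algorithm (bit-plane masks + popcount parity), not faster; return-value equivalence only.

-- ===== PORT A =====
-- int(bit) for a single character; total form of the parse, valid under Pre_ (ValueError excluded there)
def pyDigit (c : Char) : Int := (PySem.Int.ofChars? [c]).getD 0

def apply_affine (coeffs : List (List Int)) (bits : String) : String :=
  let inputs : List Int := bits.toList.map pyDigit ++ [1]
  let output : List String := coeffs.foldl (fun output row =>
    output ++ [PySem.Int.toStr ((row.zip inputs).foldl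
      (fun value p => PySem.Int.bxor value (PySem.Int.band p.1 p.2)) 0)]) []
  PySem.Str.join "" output

-- ===== PORT B =====
-- `if v & plane: m |= 1 << j` (one bit-plane update of _masks' loop body)
def pvSetBit (m : Int) (v : Int) (plane : Int) (j : Int) : Int :=
  if PySem.Int.band v plane ≠ 0 then PySem.Int.bor m ((1 : Int) <<< j.toNat) else m

-- helper _masks(vals) of Source B: the four bit-plane position masks
def pvMasks4 (vals : List Int) : Int × Int × Int × Int :=
  (PySem.List.enumerate vals).foldl (fun s jv =>
    (pvSetBit s.1 jv.2 1 jv.1, pvSetBit s.2.1 jv.2 2 jv.1,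
     pvSetBit s.2.2.1 jv.2 4 jv.1, pvSetBit s.2.2.2 jv.2 8 jv.1)) (0, 0, 0, 0)

-- (r & im).bit_count() & 1
def pvParity (r im : Int) : Int :=
  PySem.Int.band ((PySem.Int.bitCount (PySem.Int.band r im) : Int)) 1

def apply_affine_alt (coeffs : List (List Int)) (bits : String) : String :=
  let digits : List Int := bits.toList.map pyDigit ++ [1]
  let im := pvMasks4 digits
  let out : List String := coeffs.foldl (fun out row =>
    let r := pvMasks4 row
    let value : Int :=
      PySem.Int.bor (PySem.Int.bor (PySem.Int.bor
        (pvParity r.1 im.1)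
        ((pvParity r.2.1 im.2.1) <<< (1 : Nat)))
        ((pvParity r.2.2.1 im.2.2.1) <<< (2 : Nat)))
        ((pvParity r.2.2.2 im.2.2.2) <<< (3 : Nat))
    out ++ [PySem.Int.toStr value]) []
  PySem.Str.join "" out

-- ===== PRECONDITION & SPEC =====
-- Pre_ excludes exactly the inputs on which A raises: if `bits` contains any character other than
-- the ASCII digits '0'..'9' (codes 48-57), A's int(bit) raises ValueError (and B raises there too).
def Pre_apply_affine (coeffs : List (List Int)) (bits : String) : Prop :=
  bits.toList.all (fun c => 48 ≤ c.toNat && c.toNat ≤ 57) = true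
instance (coeffs : List (List Int)) (bits : String) : Decidable (Pre_apply_affine coeffs bits) := by
  unfold Pre_apply_affine; infer_instance

def pvWitness_apply_affine : List (List Int) × String := ([[3, -2], [5]], "10")

def Spec_apply_affine (coeffs : List (List Int)) (bits : String) (out : String) : Prop :=
  out = apply_affine_alt coeffs bits
instance (coeffs : List (List Int)) (bits : String) (out : String) : Decidable (Spec_apply_affine coeffs bits out) := by
  unfold Spec_apply_affine; infer_instance

-- ===== CLAIM (what is proved, stated in full; the proofs are below) =====
def Claim_equal_apply_affine : Prop := ∀ (coeffs : List (List Int)) (bits : String), Dom_apply_affine coeffs bits → Pre_apply_affine coeffs bits → Spec_apply_affine coeffs bits (apply_affine coeffs bits)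

-- ===== LEMMAS AND PROOFS =====

theorem pvOrEqAdd (m n : Nat) (h : m &&& n = 0) : m ||| n = m + n := by
  induction m using Nat.strong_induction_on generalizing n with
  | _ m ih =>
    rcases Nat.eq_zero_or_pos m with rfl | hm
    · simp
    have hdiv : m / 2 &&& n / 2 = 0 := by rw [← Nat.and_div_two, h]
    have ih2 := ih (m / 2) (by omega) (n / 2) hdiv
    have hord : (m ||| n) / 2 = m / 2 ||| n / 2 := Nat.or_div_two
    have hb : ¬(m % 2 = 1 ∧ n % 2 = 1) := by
      intro ⟨h1, h2⟩
      have := congrArg (fun x => x.testBit 0) h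
      simp [Nat.testBit_zero, h1, h2] at this
    have t0 : (m ||| n) % 2 = 1 ↔ m % 2 = 1 ∨ n % 2 = 1 := by
      have hbit := Nat.testBit_or m n 0
      simp only [Nat.testBit_zero, ← Bool.decide_or] at hbit
      exact decide_eq_decide.mp hbit
    omega

theorem pvSubAndTestBit (n m : Nat) (k : Nat) :
    (n - (n &&& m)).testBit k = (n.testBit k && !(m.testBit k)) := by
  induction k generalizing n m with
  | zero =>
    have hs1 : n &&& m ≤ n := Nat.and_le_left
    have hmod : (n &&& m) % 2 = 1 ↔ (n % 2 = 1 ∧ m % 2 = 1) :=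
      by have h0 := Nat.testBit_and n m 0
         simp only [Nat.testBit_zero, ← Bool.decide_and] at h0
         exact decide_eq_decide.mp h0
    simp only [Nat.testBit_zero]
    by_cases h1 : n % 2 = 1 <;> by_cases h2 : m % 2 = 1 <;> simp [h1, h2] <;> omega
  | succ k ih =>
    have hs1 : n &&& m ≤ n := Nat.and_le_left
    have hsd : (n &&& m) / 2 = n / 2 &&& m / 2 := Nat.and_div_two
    have hsd_le : n / 2 &&& m / 2 ≤ n / 2 := Nat.and_le_left
    have hmod : (n &&& m) % 2 = 1 ↔ (n % 2 = 1 ∧ m % 2 = 1) :=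
      by have h0 := Nat.testBit_and n m 0
         simp only [Nat.testBit_zero, ← Bool.decide_and] at h0
         exact decide_eq_decide.mp h0
    have hdiv : (n - (n &&& m)) / 2 = n / 2 - (n / 2 &&& m / 2) := by omega
    rw [Nat.testBit_succ, Nat.testBit_succ, Nat.testBit_succ, hdiv, ih]

def ibit (x : Int) (k : Nat) : Bool :=
  if 0 ≤ x then x.toNat.testBit k else !((-x - 1).toNat.testBit k)
theorem pvBandChar (a b : Int) (hb : 0 ≤ b) :
    ∃ t : Nat, PySem.Int.band a b = (t : Int) ∧ ∀ k, t.testBit k = (ibit a k && b.toNat.testBit k) := by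
  by_cases ha : 0 ≤ a
  · refine ⟨a.toNat &&& b.toNat, ?_, ?_⟩
    · simp [PySem.Int.band, ha, hb]
    · intro k; rw [Nat.testBit_and, ibit, if_pos ha]
  · refine ⟨b.toNat - (b.toNat &&& (-a - 1).toNat), ?_, ?_⟩
    · simp [PySem.Int.band, ha, hb]
    · intro k; rw [pvSubAndTestBit, ibit, if_neg ha, Bool.and_comm]
theorem pvBandTwoPow (a : Int) (b : Nat) :
    (PySem.Int.band a ((2 ^ b : Nat) : Int) ≠ 0) ↔ ibit a b = true := by
  obtain ⟨t, ht, hbits⟩ := pvBandChar a ((2 ^ b : Nat) : Int) (by positivity)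
  have h2 : (((2 ^ b : Nat) : Int)).toNat = 2 ^ b := Int.toNat_natCast _
  rw [h2] at hbits
  rw [ht]
  have htv : t = if ibit a b then 2 ^ b else 0 := by
    apply Nat.eq_of_testBit_eq
    intro i
    rw [hbits, Nat.testBit_two_pow]
    by_cases hib : b = i
    · subst hib
      cases ibit a b <;> simp
    · simp [hib]
      cases ibit a b <;> simp [hib]
  rw [htv]
  cases h : ibit a b <;> simp [h]

def zmask (bs : List Bool) (s : Nat) : Nat :=
  match bs with
  | [] => 0
  | x :: xs => (if x then 2 ^ s else 0) + zmask xs (s + 1)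
theorem zmask_testBit (bs : List Bool) (s k : Nat) :
    (zmask bs s).testBit k = (decide (s ≤ k) && decide (k < s + bs.length) && bs.getD (k - s) false) := by
  induction bs generalizing s k with
  | nil => simp [zmask]
  | cons x xs ih =>
    have hdisj : (if x then 2 ^ s else 0) &&& zmask xs (s + 1) = 0 := by
      apply Nat.eq_of_testBit_eq
      intro i
      rw [Nat.testBit_and, ih]
      cases x <;> simp [Nat.testBit_two_pow]
      intro h1; omega
    rw [zmask, ← pvOrEqAdd _ _ hdisj, Nat.testBit_or, ih]
    rcases lt_trichotomy k s with hks | hks | hks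
    · have h1 : ¬ s ≤ k := by omega
      have h2 : ¬ s + 1 ≤ k := by omega
      cases x <;> simp [Nat.testBit_two_pow, h1, h2] <;> omega
    · subst hks
      have h2 : ¬ k + 1 ≤ k := by omega
      cases x <;> simp [Nat.testBit_two_pow, h2]
    · have h1 : s ≤ k := by omega
      have h2 : s + 1 ≤ k := by omega
      have h3 : k ≠ s := by omega
      have h4 : k - s = (k - (s + 1)) + 1 := by omega
      have h5 : (k < s + 1 + xs.length) = (k < s + (x :: xs).length) := by
        simp only [List.length_cons]; rw [eq_iff_iff]; omega
      cases x <;>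
        simp only [Nat.testBit_two_pow, h3, decide_eq_true_eq, if_true, if_false,
          decide_true, h1, h2, Bool.true_and, h4, h5, List.getD_cons_succ,
          Nat.testBit_zero, decide_false, Bool.false_or] <;> simp <;> omega

theorem zmask_succ (bs : List Bool) (s : Nat) : zmask bs (s + 1) = 2 * zmask bs s := by
  induction bs generalizing s with
  | nil => simp [zmask]
  | cons x xs ih =>
    rw [zmask, zmask, ih (s + 1)]
    cases x <;> simp [pow_succ] <;> ring
theorem pvBitCountZmask (bs : List Bool) :
    PySem.Int.bitCount ((zmask bs 0 : Nat) : Int) = (bs.map Bool.toNat).sum := by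
  induction bs with
  | nil => simp [zmask]
  | cons x xs ih =>
    have hz : zmask (x :: xs) 0 = x.toNat + 2 * zmask xs 0 := by
      rw [zmask, zmask_succ]; cases x <;> simp
    rcases Nat.eq_zero_or_pos (zmask (x :: xs) 0) with h0 | h0
    · have hx : x = false := by
        rw [hz] at h0; cases x
        · rfl
        · exfalso; simp at h0
      have hxs : zmask xs 0 = 0 := by rw [hz, hx] at h0; omega
      rw [h0, hx]
      have h3 := ih; rw [hxs] at h3
      simpa using h3
    · rw [PySem.Int.bitCount_natCast h0, hz]
      have h1 : (x.toNat + 2 * zmask xs 0) % 2 = x.toNat := by cases x <;> simp [Nat.add_mul_mod_self_left]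
      have h2 : (x.toNat + 2 * zmask xs 0) / 2 = zmask xs 0 := by cases x <;> omega
      rw [h1, h2, ih]
      simp [hz]
theorem pvParityFold (bs : List Bool) (a : Bool) :
    ((bs.foldl (fun a x => Bool.xor a x) a).toNat) = (a.toNat + (bs.map Bool.toNat).sum) % 2 := by
  induction bs generalizing a with
  | nil => cases a <;> simp
  | cons x xs ih =>
    rw [List.foldl_cons, ih]
    simp only [List.map_cons, List.sum_cons]
    cases a <;> cases x <;> simp <;> omega
theorem pvPopParity (bs : List Bool) :
    PySem.Int.bitCount ((zmask bs 0 : Nat) : Int) % 2 = (bs.foldl (fun a x => Bool.xor a x) false).toNat := by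
  rw [pvBitCountZmask, pvParityFold]
  simp

theorem pvSetBitCast (a : Nat) (v : Int) (b s : Nat) (ha : a < 2 ^ s) :
    pvSetBit (a : Int) v ((2 ^ b : Nat) : Int) ((s : Nat) : Int) =
    ((a + (if ibit v b then 2 ^ s else 0) : Nat) : Int) := by
  unfold pvSetBit
  by_cases h : ibit v b = true
  · rw [if_pos ((pvBandTwoPow v b).mpr h)]
    have hsh : ((1 : Int) <<< (((s : Nat) : Int)).toNat) = ((2 ^ s : Nat) : Int) := by
      rw [Int.toNat_natCast, show (1 : Int) = ((1 : Nat) : Int) from rfl, ← Int.natCast_shiftLeft]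
      norm_num [Nat.shiftLeft_eq]
    rw [hsh, PySem.Int.bor_natCast]
    have hadd : a ||| 2 ^ s = a + 2 ^ s := by
      apply pvOrEqAdd
      rw [Nat.and_two_pow, Nat.testBit_eq_false_of_lt ha]
      simp
    rw [hadd]; simp [h]
  · rw [if_neg (fun hc => h ((pvBandTwoPow v b).mp hc))]
    simp [h]
def pbit (v : Int) (b : Nat) : Bool := ibit v b

theorem pvMasksAux (vals : List Int) (s : Nat) (a0 a1 a2 a3 : Nat)
    (h0 : a0 < 2 ^ s) (h1 : a1 < 2 ^ s) (h2 : a2 < 2 ^ s) (h3 : a3 < 2 ^ s) :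
    (PySem.List.enumerate vals ((s : Nat) : Int)).foldl (fun s jv =>
      (pvSetBit s.1 jv.2 1 jv.1, pvSetBit s.2.1 jv.2 2 jv.1,
       pvSetBit s.2.2.1 jv.2 4 jv.1, pvSetBit s.2.2.2 jv.2 8 jv.1))
      ((a0 : Int), (a1 : Int), (a2 : Int), (a3 : Int)) =
    (((a0 + zmask (vals.map (pbit · 0)) s : Nat) : Int),
     ((a1 + zmask (vals.map (pbit · 1)) s : Nat) : Int),
     ((a2 + zmask (vals.map (pbit · 2)) s : Nat) : Int),
     ((a3 + zmask (vals.map (pbit · 3)) s : Nat) : Int)) := by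
  induction vals generalizing s a0 a1 a2 a3 with
  | nil => simp [PySem.List.enumerate_nil, zmask]
  | cons v vs ih =>
    rw [PySem.List.enumerate_cons, List.foldl_cons]
    have e1 : ((s : Nat) : Int) + 1 = (((s + 1 : Nat)) : Int) := by push_cast; ring
    have c0 : pvSetBit (a0 : Int) v 1 ((s : Nat) : Int) = (((a0 + if ibit v 0 then 2 ^ s else 0) : Nat) : Int) := by
      rw [show (1 : Int) = ((2 ^ 0 : Nat) : Int) by norm_num]; exact pvSetBitCast a0 v 0 s h0
    have c1 : pvSetBit (a1 : Int) v 2 ((s : Nat) : Int) = (((a1 + if ibit v 1 then 2 ^ s else 0) : Nat) : Int) := by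
      rw [show (2 : Int) = ((2 ^ 1 : Nat) : Int) by norm_num]; exact pvSetBitCast a1 v 1 s h1
    have c2 : pvSetBit (a2 : Int) v 4 ((s : Nat) : Int) = (((a2 + if ibit v 2 then 2 ^ s else 0) : Nat) : Int) := by
      rw [show (4 : Int) = ((2 ^ 2 : Nat) : Int) by norm_num]; exact pvSetBitCast a2 v 2 s h2
    have c3 : pvSetBit (a3 : Int) v 8 ((s : Nat) : Int) = (((a3 + if ibit v 3 then 2 ^ s else 0) : Nat) : Int) := by
      rw [show (8 : Int) = ((2 ^ 3 : Nat) : Int) by norm_num]; exact pvSetBitCast a3 v 3 s h3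
    simp only [c0, c1, c2, c3, e1]
    rw [ih]
    · simp only [List.map_cons, zmask, pbit]
      cases ibit v 0 <;> cases ibit v 1 <;> cases ibit v 2 <;> cases ibit v 3 <;>
        simp [Nat.add_assoc]
    all_goals (rw [pow_succ]; split_ifs <;> omega)
theorem pvMasks4_eq (vals : List Int) :
    pvMasks4 vals = (((zmask (vals.map (pbit · 0)) 0 : Nat) : Int), ((zmask (vals.map (pbit · 1)) 0 : Nat) : Int),
      ((zmask (vals.map (pbit · 2)) 0 : Nat) : Int), ((zmask (vals.map (pbit · 3)) 0 : Nat) : Int)) := by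
  unfold pvMasks4
  have h := pvMasksAux vals 0 0 0 0 0 (by norm_num) (by norm_num) (by norm_num) (by norm_num)
  simpa using h

theorem pvMaskAnd (row digits : List Int) (b : Nat) :
    zmask (row.map (pbit · b)) 0 &&& zmask (digits.map (pbit · b)) 0 =
    zmask ((row.zip digits).map (fun p => pbit p.1 b && pbit p.2 b)) 0 := by
  apply Nat.eq_of_testBit_eq
  intro k
  rw [Nat.testBit_and, zmask_testBit, zmask_testBit, zmask_testBit]
  simp only [Nat.zero_add, List.length_map, List.length_zip, Nat.sub_zero, Nat.zero_le,
    decide_true, Bool.true_and, List.getD_eq_getElem?_getD, List.getElem?_map]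
  by_cases hk1 : k < row.length
  · by_cases hk2 : k < digits.length
    · have hkz : k < (row.zip digits).length := by rw [List.length_zip]; omega
      rw [List.getElem?_eq_getElem hk1, List.getElem?_eq_getElem hk2, List.getElem?_eq_getElem hkz,
        List.getElem_zip]
      simp [hk1, hk2, show k < min row.length digits.length by omega]
    · have e2 : digits[k]? = none := List.getElem?_eq_none (by omega)
      have e3 : (row.zip digits)[k]? = none := List.getElem?_eq_none (by rw [List.length_zip]; omega)
      rw [e2, e3]
      simp [show ¬ k < min row.length digits.length by omega, hk2]
  · have e1 : row[k]? = none := List.getElem?_eq_none (by omega)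
    have e3 : (row.zip digits)[k]? = none := List.getElem?_eq_none (by rw [List.length_zip]; omega)
    rw [e1, e3]
    simp [show ¬ k < min row.length digits.length by omega, hk1]

theorem pvFoldXorCast (l : List (Int × Int)) (hpos : ∀ p ∈ l, 0 ≤ p.2) (v : Nat) :
    l.foldl (fun value p => PySem.Int.bxor value (PySem.Int.band p.1 p.2)) ((v : Nat) : Int) =
    ((l.foldl (fun value p => value ^^^ (PySem.Int.band p.1 p.2).toNat) v : Nat) : Int) := by
  induction l generalizing v with
  | nil => rfl
  | cons p l ih =>
    obtain ⟨t, ht, _⟩ := pvBandChar p.1 p.2 (hpos p (List.mem_cons_self ..))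
    rw [List.foldl_cons, List.foldl_cons, ht, PySem.Int.bxor_natCast,
      ih (fun q hq => hpos q (List.mem_cons_of_mem _ hq)), Int.toNat_natCast]
theorem pvXorFoldBit (ts : List Nat) (v : Nat) (b : Nat) :
    (ts.foldl (· ^^^ ·) v).testBit b = (ts.map (fun t => t.testBit b)).foldl Bool.xor (v.testBit b) := by
  induction ts generalizing v with
  | nil => rfl
  | cons t ts ih => rw [List.foldl_cons, ih, List.map_cons, List.foldl_cons, Nat.testBit_xor]
theorem pvFoldFalse (bs : List Bool) (h : ∀ x ∈ bs, x = false) (a : Bool) :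
    bs.foldl Bool.xor a = a := by
  induction bs generalizing a with
  | nil => rfl
  | cons x bs ih =>
    rw [List.foldl_cons, h x (List.mem_cons_self ..), Bool.xor_false]
    exact ih (fun y hy => h y (List.mem_cons_of_mem _ hy)) a
theorem pvV16 (v : Nat) (h : v < 16) :
    v = (v.testBit 0).toNat + 2 * (v.testBit 1).toNat + 4 * (v.testBit 2).toNat + 8 * (v.testBit 3).toNat := by
  interval_cases v <;> decide
theorem pvB16 (b0 b1 b2 b3 : Bool) :
    ((b0.toNat ||| b1.toNat <<< 1) ||| b2.toNat <<< 2) ||| b3.toNat <<< 3 =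
    b0.toNat + 2 * b1.toNat + 4 * b2.toNat + 8 * b3.toNat := by
  cases b0 <;> cases b1 <;> cases b2 <;> cases b3 <;> decide


theorem pvTBit (c d : Int) (hd : 0 ≤ d) (b : Nat) :
    (PySem.Int.band c d).toNat.testBit b = (pbit c b && pbit d b) := by
  obtain ⟨t, ht, hbits⟩ := pvBandChar c d hd
  rw [ht, Int.toNat_natCast, hbits b]
  simp [pbit, ibit, hd]

theorem pvTBitHigh (c d : Int) (hd0 : 0 ≤ d) (hd16 : d < 16) (b : Nat) (hb : 4 ≤ b) :
    (PySem.Int.band c d).toNat.testBit b = false := by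
  have : d.toNat < 2 ^ b := by
    have h16 : (16 : Nat) ≤ 2 ^ b := by
      calc (16 : Nat) = 2 ^ 4 := by norm_num
      _ ≤ 2 ^ b := Nat.pow_le_pow_right (by norm_num) hb
    omega
  rw [pvTBit c d hd0]
  simp [pbit, ibit, hd0, Nat.testBit_eq_false_of_lt this]

theorem pvParityCast (R I : Nat) :
    pvParity ((R : Nat) : Int) ((I : Nat) : Int) =
      ((PySem.Int.bitCount (((R &&& I : Nat) : Nat) : Int) % 2 : Nat) : Int) := by
  unfold pvParity
  rw [PySem.Int.band_natCast, PySem.Int.band_one]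
  exact_mod_cast PySem.Int.mod_natCast _ 2

theorem pvRowEq (row digits : List Int) (hd : ∀ d ∈ digits, 0 ≤ d ∧ d < 16) :
    ((row.zip digits).foldl (fun value p => PySem.Int.bxor value (PySem.Int.band p.1 p.2)) 0) =
    (let im := pvMasks4 digits
     let r := pvMasks4 row
     PySem.Int.bor (PySem.Int.bor (PySem.Int.bor
        (pvParity r.1 im.1)
        ((pvParity r.2.1 im.2.1) <<< (1 : Nat)))
        ((pvParity r.2.2.1 im.2.2.1) <<< (2 : Nat)))
        ((pvParity r.2.2.2 im.2.2.2) <<< (3 : Nat))) := by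
  have hpos : ∀ p ∈ row.zip digits, 0 ≤ p.2 ∧ p.2 < 16 :=
    fun p hp => hd p.2 (List.of_mem_zip hp).2
  -- A side to Nat
  rw [show (0 : Int) = ((0 : Nat) : Int) from rfl,
    pvFoldXorCast _ (fun p hp => (hpos p hp).1) 0]
  set VN := (row.zip digits).foldl (fun value p => value ^^^ (PySem.Int.band p.1 p.2).toNat) 0 with hVN
  -- characterize VN bits
  have hmapeq : ∀ b : Nat,
      ((row.zip digits).map (fun p => (PySem.Int.band p.1 p.2).toNat)).map (fun t => t.testBit b) =
      (row.zip digits).map (fun p => pbit p.1 b && pbit p.2 b) := by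
    intro b
    rw [List.map_map]
    exact List.map_congr_left (fun p hp => pvTBit p.1 p.2 (hpos p hp).1 b)
  have hq : ∀ b : Nat, VN.testBit b =
      ((row.zip digits).map (fun p => pbit p.1 b && pbit p.2 b)).foldl Bool.xor false := by
    intro b
    rw [hVN, ← List.foldl_map (f := fun p : Int × Int => (PySem.Int.band p.1 p.2).toNat)
        (g := fun x y => x ^^^ y), pvXorFoldBit, Nat.zero_testBit, hmapeq]
  have hVN16 : VN < 16 := by
    have : VN < 2 ^ 4 := by
      apply Nat.lt_pow_two_of_testBit
      intro i hi
      rw [hVN, ← List.foldl_map (f := fun p : Int × Int => (PySem.Int.band p.1 p.2).toNat)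
          (g := fun x y => x ^^^ y), pvXorFoldBit, Nat.zero_testBit]
      apply pvFoldFalse
      intro x hx
      obtain ⟨t, hmem, rfl⟩ := List.mem_map.mp hx
      obtain ⟨p, hp, rfl⟩ := List.mem_map.mp hmem
      exact pvTBitHigh p.1 p.2 (hpos p hp).1 (hpos p hp).2 i hi
    simpa using this
  -- B side
  dsimp only
  rw [pvMasks4_eq row, pvMasks4_eq digits]
  dsimp only
  rw [pvParityCast, pvParityCast, pvParityCast, pvParityCast,
    pvMaskAnd, pvMaskAnd, pvMaskAnd, pvMaskAnd,
    pvPopParity, pvPopParity, pvPopParity, pvPopParity]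
  rw [show ∀ n : Nat, ((n : Int) <<< (1 : Nat)) = ((n <<< 1 : Nat) : Int) from
      fun n => (Int.natCast_shiftLeft n 1).symm,
    show ∀ n : Nat, ((n : Int) <<< (2 : Nat)) = ((n <<< 2 : Nat) : Int) from
      fun n => (Int.natCast_shiftLeft n 2).symm,
    show ∀ n : Nat, ((n : Int) <<< (3 : Nat)) = ((n <<< 3 : Nat) : Int) from
      fun n => (Int.natCast_shiftLeft n 3).symm]
  rw [PySem.Int.bor_natCast, PySem.Int.bor_natCast, PySem.Int.bor_natCast]
  rw [pvB16]
  rw [← hq 0, ← hq 1, ← hq 2, ← hq 3]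
  exact_mod_cast congrArg (fun n : Nat => (n : Int)) (pvV16 VN hVN16)

-- int(c) on an ASCII digit character parses to its value
theorem pyDigit_val (c : Char) (h1 : 48 ≤ c.toNat) (h2 : c.toNat ≤ 57) :
    PySem.Int.ofChars? [c] = some ((c.toNat : Int) - 48) := by
  rw [← Char.ofNat_toNat c]
  interval_cases c.toNat <;> decide

-- ===== VERDICT (by name: the statement is the Claim_ definition above) =====

theorem apply_affine_spec : Claim_equal_apply_affine := by
  intro coeffs bits _hdom hpre
  unfold Spec_apply_affine apply_affine apply_affine_alt
  have hd : ∀ d ∈ bits.toList.map pyDigit ++ [1], 0 ≤ d ∧ d < 16 := by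
    intro d hdm
    rcases List.mem_append.mp hdm with h | h
    · rcases List.mem_map.mp h with ⟨c, hc, rfl⟩
      have := List.all_eq_true.mp hpre c hc
      simp only [Bool.and_eq_true, decide_eq_true_eq] at this
      unfold pyDigit
      rw [pyDigit_val c this.1 this.2]
      simp only [Option.getD_some]
      omega
    · simp only [List.mem_singleton] at h; omega
  simp only
  congr 1
  rw [PySem.List.foldl_append_singleton_eq_map, PySem.List.foldl_append_singleton_eq_map]
  simp only [List.nil_append]
  apply List.map_congr_left
  intro row _
  congr 1
  exact pvRowEq row _ hd
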